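-- pv_equiv track=rewrite | github.com/fahadysf/nova-ve | backend/app/services/node_runtime_service.py | _parse_qemu_tokens
-- ===== SOURCE A (Python) =====
-- def _parse_qemu_tokens(tokens: list[str]) -> list[tuple[str, list[str]]]:
--     """Group a QEMU argv list into [(flag, [value_tokens...]), ...].
--
--     Tokens starting with '-' are flags; following non-flag tokens are their
--     values. Multiple occurrences of the same flag are kept as separate entries.
--     Leading non-flag tokens (e.g. the binary path) are represented as (token, []).
--     """
--     groups: list[tuple[str, list[str]]] = []
--     current_flag: str | None = None
--     current_vals: list[str] = []
--     for tok in tokens: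
--         if tok.startswith("-"):
--             if current_flag is not None:
--                 groups.append((current_flag, current_vals))
--             current_flag = tok
--             current_vals = []
--         else:
--             if current_flag is None:
--                 groups.append((tok, []))
--             else:
--                 current_vals.append(tok)
--     if current_flag is not None:
--         groups.append((current_flag, current_vals))
--     return groups
-- ===== SOURCE B (Python) =====
-- def _parse_qemu_tokens(tokens: list[str]) -> list[tuple[str, list[str]]]:
--     """Group a QEMU argv list into [(flag, [value_tokens...]), ...]."""
--     groups: list[tuple[str, list[str]]] = []
--     n = len(tokens)
--     i = 0
--     # leading non-flag tokens: each is its own (token, []) entry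
--     while i < n and not tokens[i].startswith("-"):
--         groups.append((tokens[i], []))
--         i += 1
--     # each flag consumes the run of following non-flag tokens as its values
--     while i < n:
--         flag = tokens[i]
--         i += 1
--         vals: list[str] = []
--         while i < n and not tokens[i].startswith("-"):
--             vals.append(tokens[i])
--             i += 1
--         groups.append((flag, vals))
--     return groups
-- ===== Notes on version B (the rewrite author's own statement) =====
-- stated objective: alternative
-- what changed: Replaces A's single carried-state scan (current_flag/current_vals with an end-of-loop flush) by index-driven nested while-loops: one loop consumes leading non-flag tokens, then an outer loop takes each flag and an inner loop gathers its run of value tokens, appending the complete (flag, vals) group immediately.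
import Mathlib
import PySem

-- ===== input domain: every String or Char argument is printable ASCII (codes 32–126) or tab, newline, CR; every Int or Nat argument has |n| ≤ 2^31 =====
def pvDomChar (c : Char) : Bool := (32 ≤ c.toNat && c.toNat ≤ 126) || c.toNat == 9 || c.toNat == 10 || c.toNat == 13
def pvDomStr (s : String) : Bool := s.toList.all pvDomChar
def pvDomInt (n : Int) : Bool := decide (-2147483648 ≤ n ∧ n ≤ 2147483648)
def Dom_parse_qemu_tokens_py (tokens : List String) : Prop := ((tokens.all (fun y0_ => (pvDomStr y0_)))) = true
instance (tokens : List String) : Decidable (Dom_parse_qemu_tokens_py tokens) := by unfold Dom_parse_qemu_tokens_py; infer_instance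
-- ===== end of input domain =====

-- B replaces A's carried current_flag/current_vals state and final flush by index-driven
-- nested scans (leading non-flags, then per-flag value runs); same O(n) cost, return value proved equal.

-- ===== PORT A =====
-- state: (groups, current_flag, current_vals)
def pvStepA (st : List (String × List String) × Option String × List String) (tok : String) :
    List (String × List String) × Option String × List String :=
  if PySem.Str.startswith tok "-" then
    match st.2.1 with
    | some f => (st.1 ++ [(f, st.2.2)], some tok, [])
    | none => (st.1, some tok, [])
  else
    match st.2.1 with
    | none => (st.1 ++ [(tok, [])], none, st.2.2)
    | some _ => (st.1, st.2.1, st.2.2 ++ [tok])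

def parse_qemu_tokens_py (tokens : List String) : List (String × List String) :=
  let st := tokens.foldl pvStepA ([], none, [])
  match st.2.1 with
  | some f => st.1 ++ [(f, st.2.2)]
  | none => st.1

-- ===== PORT B =====
-- inner while-loop: gather the run of non-flag value tokens, return (vals, rest)
def pvSpanVals : List String → List String × List String
  | [] => ([], [])
  | t :: ts =>
    if PySem.Str.startswith t "-" then ([], t :: ts)
    else
      let p := pvSpanVals ts
      (t :: p.1, p.2)

theorem pvSpanVals_len : ∀ ts : List String, (pvSpanVals ts).2.length ≤ ts.length
  | [] => le_refl _
  | t :: ts => by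
    simp only [pvSpanVals]
    split
    · simp
    · simpa using Nat.le_succ_of_le (pvSpanVals_len ts)

-- outer while-loop: take a flag, gather its values, continue on the rest
def pvGroupsB : List String → List (String × List String)
  | [] => []
  | flag :: ts =>
    let p := pvSpanVals ts
    (flag, p.1) :: pvGroupsB p.2
termination_by ts => ts.length
decreasing_by simpa using Nat.lt_succ_of_le (pvSpanVals_len ts)

-- first while-loop: leading non-flag tokens, each its own (token, []) entry
def pvLeadB : List String → List (String × List String) × List String
  | [] => ([], [])
  | t :: ts =>
    if PySem.Str.startswith t "-" then ([], t :: ts)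
    else
      let p := pvLeadB ts
      ((t, []) :: p.1, p.2)

def parse_qemu_tokens_py_alt (tokens : List String) : List (String × List String) :=
  let p := pvLeadB tokens
  p.1 ++ pvGroupsB p.2

-- ===== PRECONDITION & SPEC =====
def Spec_parse_qemu_tokens_py (tokens : List String) (out : List (String × List String)) : Prop := out = parse_qemu_tokens_py_alt tokens
instance (tokens : List String) (out : List (String × List String)) : Decidable (Spec_parse_qemu_tokens_py tokens out) := by unfold Spec_parse_qemu_tokens_py; infer_instance

-- ===== CLAIM (what is proved, stated in full; the proofs are below) =====
def Claim_equal_parse_qemu_tokens_py : Prop := ∀ (tokens : List String), Dom_parse_qemu_tokens_py tokens → Spec_parse_qemu_tokens_py tokens (parse_qemu_tokens_py tokens)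

-- ===== LEMMAS AND PROOFS =====
theorem pvGroupsB_nil : pvGroupsB [] = [] := by rw [pvGroupsB.eq_def]

theorem pvGroupsB_cons (flag : String) (ts : List String) :
    pvGroupsB (flag :: ts) = (flag, (pvSpanVals ts).1) :: pvGroupsB (pvSpanVals ts).2 := by
  rw [pvGroupsB.eq_def]

def pvFlush (st : List (String × List String) × Option String × List String) : List (String × List String) :=
  match st.2.1 with
  | some f => st.1 ++ [(f, st.2.2)]
  | none => st.1

theorem pvA_some : ∀ (ts : List String) (g : List (String × List String)) (f : String) (v : List String),
    pvFlush (ts.foldl pvStepA (g, some f, v)) =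
      g ++ [(f, v ++ (pvSpanVals ts).1)] ++ pvGroupsB (pvSpanVals ts).2
  | [], g, f, v => by simp [pvFlush, pvSpanVals, pvGroupsB_nil]
  | t :: ts, g, f, v => by
    simp only [List.foldl_cons, pvStepA, pvSpanVals]
    split
    · rw [pvA_some ts, pvGroupsB_cons]
      simp
    · rw [pvA_some ts]
      simp

theorem pvA_none : ∀ (ts : List String) (g : List (String × List String)),
    pvFlush (ts.foldl pvStepA (g, none, [])) =
      g ++ (pvLeadB ts).1 ++ pvGroupsB (pvLeadB ts).2
  | [], g => by simp [pvFlush, pvLeadB, pvGroupsB_nil]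
  | t :: ts, g => by
    simp only [List.foldl_cons, pvStepA, pvLeadB]
    split
    · rw [pvA_some ts]
      simp [pvGroupsB_cons]
    · rw [pvA_none ts]
      simp

-- ===== VERDICT (by name: the statement is the Claim_ definition above) =====
theorem parse_qemu_tokens_py_spec : Claim_equal_parse_qemu_tokens_py := by
  intro tokens _
  show parse_qemu_tokens_py tokens = parse_qemu_tokens_py_alt tokens
  have h := pvA_none tokens []
  simpa [pvFlush, parse_qemu_tokens_py, parse_qemu_tokens_py_alt] using h
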